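-- pv_equiv track=rewrite | github.com/liuhaoyuyh/LinearRAG | src/api/utils/markdown_translate_utils.py | split_code_fences
-- ===== SOURCE A (Python) =====
-- from typing import Callable, List, Tuple
--
-- def split_code_fences(text: str) -> List[Tuple[str, str]]:
--     """拆分 Markdown 为代码块与普通文本块。"""
--     blocks: List[Tuple[str, str]] = []
--     lines = text.splitlines(keepends=True)
--     in_code = False
--     fence = ""
--     buf: List[str] = []
--
--     for line in lines:
--         stripped = line.lstrip()
--         if not in_code and (stripped.startswith("```") or stripped.startswith("~~~")):
--             if buf:
--                 blocks.append(("text", "".join(buf)))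
--                 buf = []
--             in_code = True
--             fence = stripped[:3]
--             buf.append(line)
--             continue
--
--         if in_code:
--             buf.append(line)
--             if stripped.startswith(fence):
--                 blocks.append(("code", "".join(buf)))
--                 buf = []
--                 in_code = False
--                 fence = ""
--             continue
--
--         buf.append(line)
--
--     if buf:
--         blocks.append(("code" if in_code else "text", "".join(buf)))
--
--     return blocks
-- ===== SOURCE B (Python) =====
-- from typing import List, Tuple
--
-- def split_code_fences(text: str) -> List[Tuple[str, str]]:
--     lines = text.splitlines(keepends=True)
--     n = len(lines)
--     blocks: List[Tuple[str, str]] = []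
--     buf: List[str] = []
--     i = 0
--     while i < n:
--         line = lines[i]
--         stripped = line.lstrip()
--         if stripped.startswith("```") or stripped.startswith("~~~"):
--             if buf:
--                 blocks.append(("text", "".join(buf)))
--                 buf = []
--             fence = stripped[:3]
--             code = [line]
--             i += 1
--             while i < n and not lines[i].lstrip().startswith(fence):
--                 code.append(lines[i])
--                 i += 1
--             if i < n:  # closing fence line
--                 code.append(lines[i])
--                 i += 1
--             blocks.append(("code", "".join(code)))
--         else:
--             buf.append(line)
--             i += 1
--     if buf:
--         blocks.append(("text", "".join(buf)))
--     return blocks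
-- ===== Notes on version B (the rewrite author's own statement) =====
-- stated objective: alternative
-- what changed: Replaced A's single pass with an in_code/fence boolean state machine by an index-driven outer loop over lines that buffers plain text and, on an opening fence, runs an inner loop consuming the whole code block at once; no in_code flag or cross-iteration fence state remains.
import Mathlib
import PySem

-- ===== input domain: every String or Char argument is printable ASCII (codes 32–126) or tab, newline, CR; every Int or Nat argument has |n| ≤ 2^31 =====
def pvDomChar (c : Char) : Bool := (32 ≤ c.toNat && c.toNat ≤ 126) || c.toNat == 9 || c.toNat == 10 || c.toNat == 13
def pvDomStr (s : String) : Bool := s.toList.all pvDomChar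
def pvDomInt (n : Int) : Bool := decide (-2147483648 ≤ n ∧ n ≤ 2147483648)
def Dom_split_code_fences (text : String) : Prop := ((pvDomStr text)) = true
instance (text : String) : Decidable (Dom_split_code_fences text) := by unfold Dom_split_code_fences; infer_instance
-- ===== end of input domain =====

-- B replaces A's in_code/fence state machine by an outer loop plus an inner loop that
-- consumes each code block at once (alternative decomposition, same cost).

-- text.splitlines(keepends=True), ported by hand over List Char; exact on the domain's
-- line-break characters '\n', '\r', '\r\n' (the only Python line breaks inside Dom_).
def pvSplitKeep (acc : List Char) : List Char → List (List Char)
  | [] => if acc.isEmpty then [] else [acc.reverse]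
  | '\r' :: '\n' :: rest => (acc.reverse ++ ['\r', '\n']) :: pvSplitKeep [] rest
  | '\n' :: rest => (acc.reverse ++ ['\n']) :: pvSplitKeep [] rest
  | '\r' :: rest => (acc.reverse ++ ['\r']) :: pvSplitKeep [] rest
  | c :: rest => pvSplitKeep (c :: acc) rest

-- ===== PORT A =====
-- A's for-loop as structural recursion over lines, same state (blocks, in_code, fence, buf);
-- the trailing 'if buf:' flush is the [] case.  stripped[:3] = List.take 3.
def loopA (blocks : List (String × String)) (in_code : Bool) (fence : List Char)
    (buf : List (List Char)) : List (List Char) → List (String × String)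
  | [] =>
      if buf.isEmpty then blocks
      else blocks ++ [((if in_code then "code" else "text"), String.mk buf.flatten)]
  | line :: rest =>
      let stripped := PySem.Chars.lstrip line
      if !in_code && (PySem.Chars.startswith stripped ['`','`','`']
                      || PySem.Chars.startswith stripped ['~','~','~']) then
        let blocks' := if buf.isEmpty then blocks
                       else blocks ++ [("text", String.mk buf.flatten)]
        loopA blocks' true (stripped.take 3) [line] rest
      else if in_code then
        let buf' := buf ++ [line]
        if PySem.Chars.startswith stripped fence then
          loopA (blocks ++ [("code", String.mk buf'.flatten)]) false [] [] rest
        else loopA blocks in_code fence buf' rest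
      else loopA blocks in_code fence (buf ++ [line]) rest

def split_code_fences (text : String) : List (String × String) :=
  loopA [] false [] [] (pvSplitKeep [] text.toList)

-- ===== PORT B =====
-- inner while-loop of Source B: append lines until (and including) the closing-fence line;
-- returns (code lines collected, remaining lines)
def goCodeB (fence : List Char) (code : List (List Char)) :
    List (List Char) → List (List Char) × List (List Char)
  | [] => (code, [])
  | l :: rest =>
      if PySem.Chars.startswith (PySem.Chars.lstrip l) fence then (code ++ [l], rest)
      else goCodeB fence (code ++ [l]) rest

theorem goCodeB_len (fence : List Char) : ∀ (ls code : List (List Char)),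
    (goCodeB fence code ls).2.length ≤ ls.length := by
  intro ls
  induction ls with
  | nil => intro code; simp [goCodeB]
  | cons l rest ih =>
      intro code
      simp only [goCodeB]
      split
      · simp
      · exact le_trans (ih _) (Nat.le_succ _)

-- outer while-loop of Source B over the line index, as recursion on the remaining lines
def goMainB (blocks : List (String × String)) (buf : List (List Char)) :
    List (List Char) → List (String × String)
  | [] => if buf.isEmpty then blocks else blocks ++ [("text", String.mk buf.flatten)]
  | l :: rest =>
      let stripped := PySem.Chars.lstrip l
      if PySem.Chars.startswith stripped ['`','`','`']
         || PySem.Chars.startswith stripped ['~','~','~'] then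
        let blocks' := if buf.isEmpty then blocks
                       else blocks ++ [("text", String.mk buf.flatten)]
        let cr := goCodeB (stripped.take 3) [l] rest
        goMainB (blocks' ++ [("code", String.mk cr.1.flatten)]) [] cr.2
      else goMainB blocks (buf ++ [l]) rest
  termination_by ls => ls.length
  decreasing_by
  · exact Nat.lt_succ_of_le (goCodeB_len _ rest [l])
  · simp

def split_code_fences_alt (text : String) : List (String × String) :=
  goMainB [] [] (pvSplitKeep [] text.toList)

-- ===== PRECONDITION & SPEC =====
def Spec_split_code_fences (text : String) (out : List (String × String)) : Prop := out = split_code_fences_alt text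
instance (text : String) (out : List (String × String)) : Decidable (Spec_split_code_fences text out) := by unfold Spec_split_code_fences; infer_instance

-- ===== CLAIM (what is proved, stated in full; the proofs are below) =====
def Claim_equal_split_code_fences : Prop := ∀ (text : String), Dom_split_code_fences text → Spec_split_code_fences text (split_code_fences text)

-- ===== LEMMAS AND PROOFS =====

-- Inside a code block (in_code = true, buf nonempty), A's loop does exactly what
-- B's inner loop goCodeB does, then resumes with empty state; at EOF both label the
-- unterminated block "code".
theorem loopA_code (fence : List Char) : ∀ (ls buf : List (List Char))
    (blocks : List (String × String)), buf ≠ [] →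
    loopA blocks true fence buf ls =
      loopA (blocks ++ [("code", String.mk (goCodeB fence buf ls).1.flatten)]) false [] []
        (goCodeB fence buf ls).2 := by
  intro ls
  induction ls with
  | nil =>
      intro buf blocks hbuf
      simp [loopA, goCodeB, List.isEmpty_iff, hbuf]
  | cons l rest ih =>
      intro buf blocks hbuf
      by_cases h : PySem.Chars.startswith (PySem.Chars.lstrip l) fence = true
      · simp [loopA, goCodeB, h]
      · simp only [loopA, goCodeB, h, Bool.not_true, Bool.false_and, Bool.false_eq_true,
          if_false, if_true]
        exact ih (buf ++ [l]) blocks (by simp)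

-- Outside code blocks A's loop equals B's outer loop (the fence value is dead state).
theorem loopA_main : ∀ (n : ℕ) (ls : List (List Char)), ls.length ≤ n →
    ∀ (blocks : List (String × String)) (buf : List (List Char)) (fence : List Char),
    loopA blocks false fence buf ls = goMainB blocks buf ls := by
  intro n
  induction n with
  | zero =>
      intro ls hls blocks buf fence
      have : ls = [] := List.eq_nil_of_length_eq_zero (Nat.le_zero.mp hls)
      subst this; simp [loopA, goMainB]
  | succ n ih =>
      intro ls hls blocks buf fence
      match ls with
      | [] => simp [loopA, goMainB]
      | l :: rest =>
          simp only [loopA, goMainB, Bool.not_false, Bool.true_and]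
          split
          · rw [loopA_code _ rest [l] _ (by simp)]
            exact ih _ (le_trans (goCodeB_len _ rest [l])
              (Nat.le_of_succ_le_succ hls)) _ _ _
          · exact ih rest (Nat.le_of_succ_le_succ hls) _ _ _

-- ===== VERDICT (by name: the statement is the Claim_ definition above) =====
theorem split_code_fences_spec : Claim_equal_split_code_fences := by
  intro text _
  unfold Spec_split_code_fences split_code_fences split_code_fences_alt
  exact loopA_main _ _ le_rfl _ _ _
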